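-- pv_equiv track=rewrite | github.com/jdejones/jdejones.github.io | leetcode_solutions/3787-maximum-students-on-a-single-bench/3787-maximum-students-on-a-single-bench.py | maxStudentsOnBench
-- ===== SOURCE A (Python) =====
-- from typing import List
--
-- def maxStudentsOnBench(students: List[List[int]]) -> int:
--     bench_id = {_id[1]:[] for _id in students}
--     for _id in students:
--         bench_id[_id[1]].append(_id[0])
--     if len([len(set(val)) for val in bench_id.values()]) == 0:
--         return 0
--     else:
--         return max([len(set(val)) for val in bench_id.values()])
-- ===== SOURCE B (Python) =====
-- from typing import List
--
-- def maxStudentsOnBench(students: List[List[int]]) -> int: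
--     # Peel off one bench at a time: count that bench's distinct ids directly,
--     # drop its rows, and repeat on what is left (no grouping dict at all).
--     best = 0
--     rest = students
--     while rest:
--         bench = rest[0][1]
--         best = max(best, len({s[0] for s in rest if s[1] == bench}))
--         rest = [s for s in rest if s[1] != bench]
--     return best
-- ===== Notes on version B (the rewrite author's own statement) =====
-- stated objective: alternative
-- what changed: B abandons A's dict-of-lists grouping entirely: a peel-off loop repeatedly takes the bench of the first remaining row, counts that bench's distinct ids with one set comprehension, filters those rows away and repeats, tracking a running max; A instead builds a bench->list dict in two passes, deduplicates every value list with set, and takes the max of the resulting list.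
import Mathlib
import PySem

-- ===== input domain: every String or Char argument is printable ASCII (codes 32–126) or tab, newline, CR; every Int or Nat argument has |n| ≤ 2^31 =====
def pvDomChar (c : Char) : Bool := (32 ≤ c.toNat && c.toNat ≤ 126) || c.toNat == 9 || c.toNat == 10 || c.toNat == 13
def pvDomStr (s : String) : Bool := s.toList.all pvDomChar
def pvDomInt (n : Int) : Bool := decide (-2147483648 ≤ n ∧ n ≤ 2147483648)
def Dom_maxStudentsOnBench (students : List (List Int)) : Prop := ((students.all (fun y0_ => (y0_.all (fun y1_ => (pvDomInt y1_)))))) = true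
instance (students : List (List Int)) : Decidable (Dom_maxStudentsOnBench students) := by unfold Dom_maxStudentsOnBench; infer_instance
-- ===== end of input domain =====

-- B replaces A's dict-of-lists grouping by a peel-off loop: take the first remaining row's
-- bench, count its distinct ids, drop its rows, repeat (objective: alternative decomposition).

-- ===== PORT A =====
def maxStudentsOnBench (students : List (List Int)) : Int :=
  let benchId0 : PySem.Dict Int (List Int) :=
    students.foldl (fun d s => d.insert (PySem.List.pyGetD s 1 0) []) PySem.Dict.empty
  let benchId : PySem.Dict Int (List Int) :=
    students.foldl
      (fun d s => d.modify (PySem.List.pyGetD s 1 0) [] (fun l => l ++ [PySem.List.pyGetD s 0 0]))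
      benchId0
  let lens : List Int := benchId.values.map (fun val => PySem.Set.len (PySem.Set.ofList val))
  if lens.length == 0 then 0
  else
    match PySem.List.max? lens (fun x => x) with
    | some m => m
    | none => 0

-- ===== PORT B =====
-- the while loop of Source B: state (best, rest)
def pvPeelLoop (best : Int) (rest : List (List Int)) : Int :=
  match rest with
  | [] => best
  | s :: t =>
    let bench := PySem.List.pyGetD s 1 0
    let here : Int := PySem.Set.len (PySem.Set.ofList
      (((s :: t).filter (fun u => PySem.List.pyGetD u 1 0 == bench)).map
        (fun u => PySem.List.pyGetD u 0 0)))
    pvPeelLoop (max best here)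
      ((s :: t).filter (fun u => !(PySem.List.pyGetD u 1 0 == bench)))
termination_by rest.length
decreasing_by
  simp only [List.filter_cons]
  simp only [beq_self_eq_true, Bool.not_true]
  exact Nat.lt_succ_of_le (List.length_filter_le _ _)

def maxStudentsOnBench_alt (students : List (List Int)) : Int :=
  pvPeelLoop 0 students

-- ===== PRECONDITION & SPEC =====
-- Pre_ excludes exactly the inputs on which the Python A raises IndexError: an inner list with fewer than 2 elements.
def Pre_maxStudentsOnBench (students : List (List Int)) : Prop := ∀ s ∈ students, 2 ≤ s.length
instance (students : List (List Int)) : Decidable (Pre_maxStudentsOnBench students) := by unfold Pre_maxStudentsOnBench; infer_instance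
def pvWitness_maxStudentsOnBench : List (List Int) := [[1, 2], [3, 2], [1, 2], [5, 9]]

def Spec_maxStudentsOnBench (students : List (List Int)) (out : Int) : Prop := out = maxStudentsOnBench_alt students
instance (students : List (List Int)) (out : Int) : Decidable (Spec_maxStudentsOnBench students out) := by unfold Spec_maxStudentsOnBench; infer_instance

-- ===== CLAIM (what is proved, stated in full; the proofs are below) =====
def Claim_equal_maxStudentsOnBench : Prop := ∀ (students : List (List Int)), Dom_maxStudentsOnBench students → Pre_maxStudentsOnBench students → Spec_maxStudentsOnBench students (maxStudentsOnBench students)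

-- ===== LEMMAS AND PROOFS =====

-- abbreviations for the proofs: the bench / id field of a row, distinct-id count of a bench
def pvBench (u : List Int) : Int := PySem.List.pyGetD u 1 0
def pvId (u : List Int) : Int := PySem.List.pyGetD u 0 0
def pvCnt (l : List (List Int)) (b : Int) : Int :=
  PySem.Set.len (PySem.Set.ofList ((l.filter (fun u => pvBench u == b)).map pvId))

theorem pvBench_def (u : List Int) : PySem.List.pyGetD u 1 0 = pvBench u := rfl
theorem pvId_def (u : List Int) : PySem.List.pyGetD u 0 0 = pvId u := rfl
theorem pvCnt_def (l : List (List Int)) (b : Int) :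
    PySem.Set.len (PySem.Set.ofList ((l.filter (fun u => pvBench u == b)).map pvId)) = pvCnt l b := rfl

theorem pv_cnt_nonneg (l : List (List Int)) (b : Int) : 0 ≤ pvCnt l b := by
  simp [pvCnt, PySem.Set.len]

-- ofList commutes with a value-based filter (first occurrences survive filtering).
theorem pv_ofList_filter {α : Type} [BEq α] [LawfulBEq α] (p : α → Bool) (l : List α) :
    PySem.Set.ofList (l.filter p) = (PySem.Set.ofList l).filter p := by
  induction l with
  | nil => rfl
  | cons x l ih =>
    by_cases hp : p x = true
    · rw [List.filter_cons_of_pos hp, PySem.Set.ofList_cons, PySem.Set.ofList_cons,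
        PySem.Set.discard, PySem.Set.discard, List.filter_cons_of_pos hp, ih,
        List.filter_filter, List.filter_filter]
      congr 1
      apply List.filter_congr
      intro y _
      cases h1 : (y == x) <;> cases h2 : p y <;> simp
    · rw [List.filter_cons_of_neg hp, PySem.Set.ofList_cons, PySem.Set.discard,
        List.filter_cons_of_neg hp, ih, List.filter_filter]
      apply List.filter_congr
      intro y _
      cases h2 : p y with
      | false => simp
      | true =>
        have : ¬ (y == x) = true := by
          intro hyx
          exact hp (by rwa [← (beq_iff_eq).1 hyx])
        simp [this]

-- filtering another bench's rows away does not change a bench's distinct-id count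
theorem pv_cnt_filter (l : List (List Int)) (b0 b : Int) (hb : b ≠ b0) :
    pvCnt (l.filter (fun u => !(pvBench u == b0))) b = pvCnt l b := by
  unfold pvCnt
  rw [List.filter_filter]
  have : l.filter (fun a => (pvBench a == b) && !(pvBench a == b0))
      = l.filter (fun u => pvBench u == b) := by
    apply List.filter_congr
    intro u _
    by_cases h : pvBench u = b
    · simp [h, hb]
    · simp [h]
  rw [this]

-- B's loop computes the running max of pvCnt over the benches in first-occurrence order
theorem pv_peel_eq (n : Nat) : ∀ (rest : List (List Int)), rest.length ≤ n → ∀ (best : Int),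
    pvPeelLoop best rest
      = (PySem.Set.ofList (rest.map pvBench)).foldl (fun a b => max a (pvCnt rest b)) best := by
  induction n with
  | zero =>
    intro rest hl best
    rw [List.length_eq_zero_iff.1 (Nat.le_zero.1 hl)]
    simp [pvPeelLoop]
  | succ n ih =>
    intro rest hl best
    match rest with
    | [] => simp [pvPeelLoop]
    | s :: t =>
      rw [pvPeelLoop]
      simp only [pvBench_def, pvId_def, pvCnt_def]
      have hlen : ((s :: t).filter (fun u => !(pvBench u == pvBench s))).length ≤ n := by
        rw [List.filter_cons_of_neg (by simp)]
        exact le_trans (List.length_filter_le _ _) (Nat.le_of_succ_le_succ hl)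
      rw [ih _ hlen]
      have hmapf : ((s :: t).filter (fun u => !(pvBench u == pvBench s))).map pvBench
          = ((s :: t).map pvBench).filter (fun x => !(x == pvBench s)) := by
        rw [List.filter_map]
        rfl
      have hD : PySem.Set.ofList (((s :: t).filter (fun u => !(pvBench u == pvBench s))).map pvBench)
          = (PySem.Set.ofList (t.map pvBench)).discard (pvBench s) := by
        rw [hmapf, pv_ofList_filter, List.map_cons, PySem.Set.ofList_cons]
        rw [List.filter_cons_of_neg (by simp)]
        rw [PySem.Set.discard, List.filter_filter]
        apply List.filter_congr
        intro y _
        cases h : (y == pvBench s) <;> simp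
      rw [hD]
      rw [List.map_cons, PySem.Set.ofList_cons, List.foldl_cons]
      apply PySem.List.foldl_congr_mem
      intro acc b hb
      have hbne : b ≠ pvBench s := ((PySem.Set.mem_discard _ _ _).1 hb).2
      rw [pv_cnt_filter _ _ _ hbne]

-- the first dict-comprehension loop of A only ever stores [].
theorem pv_getD_fold_insert_nil (l : List (List Int)) (d : PySem.Dict Int (List Int))
    (h : ∀ k, d.getD k ([] : List Int) = []) (k : Int) :
    (l.foldl (fun d s => d.insert (PySem.List.pyGetD s 1 0) []) d).getD k [] = [] := by
  induction l generalizing d with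
  | nil => exact h k
  | cons s l ih =>
    refine ih _ (fun k' => ?_)
    rw [PySem.Dict.getD_insert]
    split <;> simp [h]

-- A's per-bench distinct-count list is pvCnt mapped over the bench set
theorem pv_lens_eq (students : List (List Int)) :
    ((students.foldl
        (fun d s => d.modify (PySem.List.pyGetD s 1 0) [] (fun l => l ++ [PySem.List.pyGetD s 0 0]))
        (students.foldl (fun d s => d.insert (PySem.List.pyGetD s 1 0) []) (PySem.Dict.empty : PySem.Dict Int (List Int)))).values.map
      (fun val => PySem.Set.len (PySem.Set.ofList val)))
    = (PySem.Set.ofList (students.map pvBench)).map (pvCnt students) := by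
  set f : List Int → Int × Int := fun st => (PySem.List.pyGetD st 1 0, PySem.List.pyGetD st 0 0) with hf
  have hd0keys : (students.foldl (fun d s => d.insert (PySem.List.pyGetD s 1 0) [])
        (PySem.Dict.empty : PySem.Dict Int (List Int))).keys
      = PySem.Set.ofList (students.map pvBench) := by
    rw [PySem.Dict.keys_foldl_insert_key students (fun s => PySem.List.pyGetD s 1 0) (fun _ _ => [])]
    rfl
  have hkeys : (students.foldl
        (fun d s => d.modify (PySem.List.pyGetD s 1 0) [] (fun l => l ++ [PySem.List.pyGetD s 0 0]))
        (students.foldl (fun d s => d.insert (PySem.List.pyGetD s 1 0) [])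
          (PySem.Dict.empty : PySem.Dict Int (List Int)))).keys
      = PySem.Set.ofList (students.map pvBench) := by
    rw [PySem.Dict.keys_foldl_modify_key students (fun s => PySem.List.pyGetD s 1 0) []
        (fun d s => fun l => l ++ [PySem.List.pyGetD s 0 0]), hd0keys,
      PySem.Set.update_eq_append_filter]
    simp only [pvBench_def]
    have : (PySem.Set.ofList (students.map pvBench)).filter
        (fun y => !(PySem.Set.ofList (students.map pvBench)).contains y) = [] := by
      rw [List.filter_eq_nil_iff]
      intro y hy
      have hy' := (PySem.Set.mem_ofList _ _).1 hy
      simpa using hy'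
    rw [this, List.append_nil]
  have hnodup : (students.foldl
        (fun d s => d.modify (PySem.List.pyGetD s 1 0) [] (fun l => l ++ [PySem.List.pyGetD s 0 0]))
        (students.foldl (fun d s => d.insert (PySem.List.pyGetD s 1 0) [])
          (PySem.Dict.empty : PySem.Dict Int (List Int)))).keys.Nodup := by
    rw [hkeys]; exact PySem.Set.nodup_ofList _
  rw [PySem.Dict.values_eq_map_keys _ hnodup ([] : List Int), hkeys, List.map_map]
  apply List.map_congr_left
  intro b _
  have hfold : students.foldl
        (fun d s => d.modify (PySem.List.pyGetD s 1 0) [] (fun l => l ++ [PySem.List.pyGetD s 0 0]))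
        (students.foldl (fun d s => d.insert (PySem.List.pyGetD s 1 0) [])
          (PySem.Dict.empty : PySem.Dict Int (List Int)))
      = (students.map f).foldl (fun d p => d.modify p.1 [] (fun l => l ++ [p.2]))
          (students.foldl (fun d s => d.insert (PySem.List.pyGetD s 1 0) [])
            (PySem.Dict.empty : PySem.Dict Int (List Int))) :=
      (List.foldl_map (f := f) (g := fun d p => d.modify p.1 [] (fun l => l ++ [p.2]))
        (l := students)
        (init := students.foldl (fun d s => d.insert (PySem.List.pyGetD s 1 0) [])
          (PySem.Dict.empty : PySem.Dict Int (List Int)))).symm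
  simp only [Function.comp]
  rw [hfold, PySem.Dict.getD_foldl_modify_append,
    pv_getD_fold_insert_nil students _ (fun k => PySem.Dict.getD_empty _ _) b, List.nil_append]
  unfold pvCnt
  congr 1
  rw [List.filter_map, List.map_map]
  rfl

-- A's "if empty then 0 else max(lens)" equals B's fold of max from 0, for nonnegative entries
theorem pv_max_eq (L : List Int) (h : ∀ x ∈ L, 0 ≤ x) :
    (if L.length == 0 then (0 : Int)
     else match PySem.List.max? L (fun x => x) with | some m => m | none => 0)
    = L.foldl (fun a x => max a x) 0 := by
  match L with
  | [] => rfl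
  | x :: t =>
    rw [PySem.List.max?_id_cons]
    have hx : max 0 x = x := max_eq_right (h x (by simp))
    simp [hx]

-- ===== VERDICT (by name: the statement is the Claim_ definition above) =====
theorem maxStudentsOnBench_spec : Claim_equal_maxStudentsOnBench := by
  intro students _ _
  unfold Spec_maxStudentsOnBench maxStudentsOnBench maxStudentsOnBench_alt
  rw [pv_peel_eq students.length students le_rfl 0]
  simp only [pv_lens_eq]
  rw [show ((PySem.Set.ofList (students.map pvBench)).foldl (fun a b => max a (pvCnt students b)) 0)
      = (((PySem.Set.ofList (students.map pvBench)).map (pvCnt students)).foldl (fun a x => max a x) 0)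
    from by rw [List.foldl_map]]
  apply pv_max_eq
  intro x hx
  obtain ⟨b, _, rfl⟩ := List.mem_map.1 hx
  exact pv_cnt_nonneg _ _
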